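-- pv_equiv track=rewrite | github.com/peinikanxue/leetcode | easy/12.整数转罗马数字.py | get_highest_number
-- ===== SOURCE A (Python) =====
-- def get_highest_number(num):
--     result = 1
--     pre = 0
--     while num != 0:
--         result *= 10
--         pre = num % 10
--         num //= 10
--     return result * pre // 10
-- ===== SOURCE B (Python) =====
-- def get_highest_number(num):
--     # Recursive decomposition: the highest place of num is 10x the highest place of num // 10.
--     if num < 10:
--         return num
--     return 10 * get_highest_number(num // 10)
-- ===== Notes on version B (the rewrite author's own statement) =====
-- stated objective: simpler
-- what changed: Replaced the iterative loop that accumulates a power of ten and the last remainder (with a trailing floor-division fixup) by a direct two-line recursion on num // 10.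
import Mathlib
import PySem

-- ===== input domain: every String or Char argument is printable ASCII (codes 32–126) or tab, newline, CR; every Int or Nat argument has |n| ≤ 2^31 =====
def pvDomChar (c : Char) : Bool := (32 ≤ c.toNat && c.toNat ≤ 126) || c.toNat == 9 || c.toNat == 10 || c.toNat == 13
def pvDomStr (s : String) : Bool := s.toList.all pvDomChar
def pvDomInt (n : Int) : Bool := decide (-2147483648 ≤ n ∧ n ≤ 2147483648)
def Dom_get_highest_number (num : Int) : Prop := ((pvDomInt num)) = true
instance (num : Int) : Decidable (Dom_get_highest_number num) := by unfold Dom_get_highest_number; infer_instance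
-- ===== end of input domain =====

-- B replaces A's accumulator loop by a two-line recursion on num // 10 (objective: simpler).
-- Pre_ excludes negative num, on which Python A loops forever (num //= 10 sticks at -1).


-- ===== PORT A =====
-- while num != 0: result *= 10; pre = num % 10; num //= 10 — ported with fuel (the loop
-- does not terminate for negative num in Python; fuel natAbs+1 suffices on Pre_).
def ghnLoop : Nat → Int → Int → Int → Int
  | 0, _, result, pre => PySem.Int.floordiv (result * pre) 10
  | f + 1, num, result, pre =>
      if num = 0 then PySem.Int.floordiv (result * pre) 10
      else ghnLoop f (PySem.Int.floordiv num 10) (result * 10) (PySem.Int.mod num 10)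

def get_highest_number (num : Int) : Int := ghnLoop (num.natAbs + 1) num 1 0

-- ===== PORT B =====
def get_highest_number_alt (num : Int) : Int :=
  if h : num < 10 then num
  else 10 * get_highest_number_alt (PySem.Int.floordiv num 10)
termination_by num.toNat
decreasing_by
  have h10 : PySem.Int.floordiv num 10 = num / 10 := PySem.Int.floordiv_eq_ediv_of_pos (by omega)
  rw [h10]; omega

-- ===== PRECONDITION & SPEC =====
-- Pre_ excludes negative num: there Python A never returns (the while loop runs forever).
def Pre_get_highest_number (num : Int) : Prop := 0 ≤ num
instance (num : Int) : Decidable (Pre_get_highest_number num) := by unfold Pre_get_highest_number; infer_instance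
def pvWitness_get_highest_number : Int := 907
def Spec_get_highest_number (num : Int) (out : Int) : Prop := out = get_highest_number_alt num
instance (num : Int) (out : Int) : Decidable (Spec_get_highest_number num out) := by unfold Spec_get_highest_number; infer_instance

-- ===== CLAIM (what is proved, stated in full; the proofs are below) =====
def Claim_equal_get_highest_number : Prop := ∀ (num : Int), Dom_get_highest_number num → Pre_get_highest_number num → Spec_get_highest_number num (get_highest_number num)

-- ===== LEMMAS AND PROOFS =====

theorem alt_small {num : Int} (h : num < 10) : get_highest_number_alt num = num := by
  rw [get_highest_number_alt]; simp [h]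

theorem alt_big {num : Int} (h : ¬ num < 10) :
    get_highest_number_alt num = 10 * get_highest_number_alt (PySem.Int.floordiv num 10) := by
  rw [get_highest_number_alt]; simp [h]

-- loop invariant: once num > 0, the loop returns r times the highest place of num.
theorem ghnLoop_inv : ∀ (f : Nat) (n r p : Int), 0 < n → n.toNat < f →
    ghnLoop f n r p = r * get_highest_number_alt n := by
  intro f
  induction f with
  | zero => intro n r p hn hf; omega
  | succ f ih =>
    intro n r p hn hf
    have hne : n ≠ 0 := by omega
    have hdiv : PySem.Int.floordiv n 10 = n / 10 := PySem.Int.floordiv_eq_ediv_of_pos (by omega)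
    have hmod : PySem.Int.mod n 10 = n % 10 := PySem.Int.mod_eq_emod_of_pos (by omega)
    simp only [ghnLoop, hne, if_false]
    by_cases hsmall : n < 10
    · have hq : n / 10 = 0 := by omega
      have hm : n % 10 = n := by omega
      rw [hdiv, hmod, hq, hm]
      have : ghnLoop f 0 (r * 10) n = PySem.Int.floordiv (r * 10 * n) 10 := by
        cases f <;> simp [ghnLoop]
      rw [this, alt_small hsmall]
      have : r * 10 * n = (r * n) * 10 := by ring
      rw [this, PySem.Int.floordiv_eq_ediv_of_pos (by omega)]
      simp
    · have hq0 : 0 < n / 10 := by omega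
      have hqlt : (n / 10).toNat < f := by
        have : n / 10 < n := by omega
        omega
      rw [hdiv, hmod]
      rw [ih (n / 10) (r * 10) (n % 10) hq0 hqlt, alt_big hsmall, hdiv]
      ring

-- ===== VERDICT (by name: the statement is the Claim_ definition above) =====
theorem get_highest_number_spec : Claim_equal_get_highest_number := by
  intro num _ hpre
  unfold Spec_get_highest_number get_highest_number
  by_cases h0 : num = 0
  · subst h0; simp [ghnLoop, PySem.Int.floordiv, alt_small (by norm_num : (0:Int) < 10)]
  · have hpos : 0 < num := by unfold Pre_get_highest_number at hpre; omega
    rw [ghnLoop_inv (num.natAbs + 1) num 1 0 hpos (by omega)]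
    ring
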